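-- pv_equiv track=rewrite | github.com/dinimicky/py_arith | 2014_r1b_pa.py | maxSubStr
-- ===== SOURCE A (Python) =====
-- def maxSubStr(A,B):
--     n = len(A)
--     m = len(B)
--     mss = ""
--
--     if A[0] != B[0]:
--         return "Fegla Won"
--     i = j = 1
--     mss += A[0]
--     while i < n and j < m:
--         if A[i] == B[j]:
--             mss += A[i]
--             i += 1
--             j += 1
--             continue
--         if A[i - 1] == A[i]:
--             i += 1
--             continue
--         if B[j - 1] == B[j]:
--             j += 1
--             continue
--         return "Fegla Won"
--     return mss
-- ===== SOURCE B (Python) =====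
-- # B: run-length encode both strings once, then zip aligned runs emitting min counts.
-- def maxSubStr(A, B):
--     runsA = rle(A)
--     runsB = rle(B)
--     out = []
--     for (ca, na), (cb, nb) in zip(runsA, runsB):
--         if ca != cb:
--             return "Fegla Won"
--         out.append(ca * min(na, nb))
--     return "".join(out)
--
-- def rle(s):
--     runs = []
--     i = 0
--     while i < len(s):
--         j = i
--         while j < len(s) and s[j] == s[i]:
--             j += 1
--         runs.append((s[i], j - i))
--         i = j
--     return runs
-- ===== Notes on version B (the rewrite author's own statement) =====
-- stated objective: alternative
-- what changed: Replaces A's two-pointer character walk with previous-character backtracking by run-length encoding both strings once and zipping aligned runs, emitting each run's character min(countA,countB) times and failing on the first run-character mismatch.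
import Mathlib
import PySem

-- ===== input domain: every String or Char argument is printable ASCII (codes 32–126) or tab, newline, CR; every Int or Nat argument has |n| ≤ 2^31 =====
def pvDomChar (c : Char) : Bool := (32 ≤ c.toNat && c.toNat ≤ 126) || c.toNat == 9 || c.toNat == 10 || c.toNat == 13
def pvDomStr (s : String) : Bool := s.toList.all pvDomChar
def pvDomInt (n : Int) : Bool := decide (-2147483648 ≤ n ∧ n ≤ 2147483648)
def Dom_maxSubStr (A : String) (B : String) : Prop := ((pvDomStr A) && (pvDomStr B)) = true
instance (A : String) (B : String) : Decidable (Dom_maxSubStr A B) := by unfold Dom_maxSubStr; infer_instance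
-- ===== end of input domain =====

-- B replaces A's two-pointer character walk by run-length encoding both strings once
-- and zipping aligned runs with min counts (objective: alternative decomposition, same cost).

-- ===== PORT A =====
-- the while loop of A as structural recursion; pa/pb carry A[i-1]/B[j-1]
def maxSubStrLoop : Char → Char → List Char → List Char → List Char → List Char
  | pa, pb, x :: xs, y :: ys, mss =>
    if x = y then maxSubStrLoop x y xs ys (mss ++ [x])
    else if pa = x then maxSubStrLoop x pb xs (y :: ys) mss
    else if pb = y then maxSubStrLoop pa y (x :: xs) ys mss
    else "Fegla Won".toList
  | _, _, _, _, mss => mss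
termination_by _ _ xs ys _ => xs.length + ys.length

def maxSubStr (A : String) (B : String) : String :=
  match A.toList, B.toList with
  | x :: xs, y :: ys =>
    if x ≠ y then "Fegla Won"
    else String.ofList (maxSubStrLoop x y xs ys [x])
  | _, _ => ""  -- Python A raises IndexError on empty input (excluded by Pre_)

-- ===== PORT B =====
-- run-length encoding: scan each maximal run (the inner while of Source B's rle)
def rle : List Char → List (Char × Nat)
  | [] => []
  | x :: xs =>
    (x, (xs.takeWhile (· == x)).length + 1) :: rle (xs.dropWhile (· == x))
termination_by l => l.length
decreasing_by
  simp only [List.length_cons]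
  exact Nat.lt_succ_of_le (List.length_dropWhile_le _ _)

def zipRuns : List (Char × Nat) → List (Char × Nat) → Option (List Char)
  | (c, n) :: ra, (d, m) :: rb =>
    if c = d then (zipRuns ra rb).map (List.replicate (min n m) c ++ ·)
    else none
  | _, _ => some []

def maxSubStr_alt (A : String) (B : String) : String :=
  match zipRuns (rle A.toList) (rle B.toList) with
  | none => "Fegla Won"
  | some l => String.ofList l

-- ===== PRECONDITION & SPEC =====
-- Pre_ excludes exactly the inputs where Python A raises IndexError (an empty string).
def Pre_maxSubStr (A : String) (B : String) : Prop := A.toList ≠ [] ∧ B.toList ≠ []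
instance (A : String) (B : String) : Decidable (Pre_maxSubStr A B) := by unfold Pre_maxSubStr; infer_instance
def pvWitness_maxSubStr : String × String := ("aab", "ab")

def Spec_maxSubStr (A : String) (B : String) (out : String) : Prop := out = maxSubStr_alt A B
instance (A : String) (B : String) (out : String) : Decidable (Spec_maxSubStr A B out) := by unfold Spec_maxSubStr; infer_instance

-- ===== CLAIM (what is proved, stated in full; the proofs are below) =====
def Claim_equal_maxSubStr : Prop := ∀ (A : String) (B : String), Dom_maxSubStr A B → Pre_maxSubStr A B → Spec_maxSubStr A B (maxSubStr A B)

-- ===== LEMMAS AND PROOFS =====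

-- a new run starts: the first run of x has length 1
lemma rle_cons_ne {x y : Char} (h : (y == x) = false) (ys : List Char) :
    rle (x :: y :: ys) = (x, 1) :: rle (y :: ys) := by
  simp [rle, h]

-- duplicating the head extends the first run by one, same tail runs
lemma rle_shape (x : Char) (xs : List Char) :
    ∃ n rest, rle (x :: xs) = (x, n + 1) :: rest ∧ rle (x :: x :: xs) = (x, n + 1 + 1) :: rest :=
  ⟨(xs.takeWhile (· == x)).length, rle (xs.dropWhile (· == x)), by simp [rle], by simp [rle]⟩

lemma zip_cons_same (x : Char) (n m : Nat) (ra rb : List (Char × Nat)) :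
    zipRuns ((x, n + 1) :: ra) ((x, m + 1) :: rb)
      = (zipRuns ra rb).map (fun t => x :: (List.replicate (min n m) x ++ t)) := by
  cases hz : zipRuns ra rb <;>
    simp [zipRuns, hz, Nat.succ_min_succ, List.replicate_succ]

lemma zip_one_right (x : Char) (k : Nat) (ra rb : List (Char × Nat)) :
    zipRuns ((x, k + 1) :: ra) ((x, 1) :: rb) = (zipRuns ra rb).map (fun t => x :: t) := by
  cases hz : zipRuns ra rb <;> simp [zipRuns, hz, Nat.min_def]

lemma zip_one_one (x : Char) (ra rb : List (Char × Nat)) :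
    zipRuns ((x, 1) :: ra) ((x, 1) :: rb) = (zipRuns ra rb).map (fun t => x :: t) := by
  cases hz : zipRuns ra rb <;> simp [zipRuns, hz]

lemma zip_one_left (x : Char) (k : Nat) (ra rb : List (Char × Nat)) :
    zipRuns ((x, 1) :: ra) ((x, k + 1) :: rb) = (zipRuns ra rb).map (fun t => x :: t) := by
  cases hz : zipRuns ra rb <;> simp [zipRuns, hz, Nat.min_def]

-- a successful zip of the runs of x::xs and x::ys starts with x
lemma zipRuns_head {x : Char} {xs ys l : List Char}
    (h : zipRuns (rle (x :: xs)) (rle (x :: ys)) = some l) :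
    l = x :: l.drop 1 := by
  obtain ⟨n, ra, h1, -⟩ := rle_shape x xs
  obtain ⟨m, rb, h2, -⟩ := rle_shape x ys
  rw [h1, h2, zip_cons_same] at h
  cases hz : zipRuns ra rb with
  | none => rw [hz] at h; simp at h
  | some r => rw [hz] at h; simp only [Option.map_some, Option.some.injEq] at h; rw [← h]; simp

-- the core invariant: A's loop from aligned state (both previous chars = c)
-- computes exactly B's zip of the runs of c::xs and c::ys (minus the first c, already in mss)
lemma loop_eq_zip : ∀ (n : Nat) (xs ys : List Char), xs.length + ys.length ≤ n →
    ∀ (c : Char) (acc : List Char),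
    maxSubStrLoop c c xs ys acc =
      match zipRuns (rle (c :: xs)) (rle (c :: ys)) with
      | none => "Fegla Won".toList
      | some l => acc ++ l.drop 1 := by
  intro n
  induction n with
  | zero =>
    intro xs ys h c acc
    have hx : xs = [] := by cases xs <;> simp_all
    have hy : ys = [] := by cases ys <;> simp_all
    subst hx; subst hy
    simp [maxSubStrLoop, rle, zipRuns]
  | succ n ih =>
    intro xs ys h c acc
    match xs, ys with
    | [], ys =>
      cases ys with
      | nil => simp [maxSubStrLoop, rle, zipRuns]
      | cons y ys' =>
        simp only [maxSubStrLoop]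
        by_cases hyc : (y == c) = true
        · have : y = c := by simpa using hyc
          subst this
          obtain ⟨m, rb, -, h2⟩ := rle_shape y ys'
          rw [show rle [y] = (y, 1) :: ([] : List (Char × Nat)) by simp [rle], h2,
            zip_one_left, show zipRuns [] rb = some [] by simp [zipRuns]]
          simp
        · have hyc' : (y == c) = false := by simpa using hyc
          rw [show rle [c] = (c, 1) :: ([] : List (Char × Nat)) by simp [rle],
            rle_cons_ne hyc', zip_one_one, show zipRuns [] (rle (y :: ys')) = some []
              by simp [zipRuns]]
          simp
    | x :: xs', [] =>
      simp only [maxSubStrLoop]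
      by_cases hxc : (x == c) = true
      · have : x = c := by simpa using hxc
        subst this
        obtain ⟨m, ra, -, h2⟩ := rle_shape x xs'
        rw [show rle [x] = (x, 1) :: ([] : List (Char × Nat)) by simp [rle], h2,
          zip_one_right, show zipRuns ra [] = some [] by cases ra <;> simp [zipRuns]]
        simp
      · have hxc' : (x == c) = false := by simpa using hxc
        rw [show rle [c] = (c, 1) :: ([] : List (Char × Nat)) by simp [rle],
          rle_cons_ne hxc']
        rw [zip_one_one, show zipRuns (rle (x :: xs')) [] = some []
            by cases hr : rle (x :: xs') <;> simp [zipRuns]]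
        simp
    | x :: xs', y :: ys' =>
      by_cases hxy : x = y
      · subst hxy
        rw [show maxSubStrLoop c c (x :: xs') (x :: ys') acc
              = maxSubStrLoop x x xs' ys' (acc ++ [x]) by simp [maxSubStrLoop]]
        rw [ih xs' ys' (by simp at h ⊢; omega) x (acc ++ [x])]
        by_cases hxc : x = c
        · subst hxc
          obtain ⟨nA, ra, ha1, ha2⟩ := rle_shape x xs'
          obtain ⟨nB, rb, hb1, hb2⟩ := rle_shape x ys'
          rw [ha1, hb1, ha2, hb2, zip_cons_same, zip_cons_same]
          cases hz : zipRuns ra rb with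
          | none => simp
          | some r => simp [Nat.succ_min_succ, List.replicate_succ]
        · have hxc' : (x == c) = false := by simpa using hxc
          rw [rle_cons_ne hxc', rle_cons_ne hxc', zip_one_one]
          cases hz : zipRuns (rle (x :: xs')) (rle (x :: ys')) with
          | none => simp
          | some l =>
            have hl := zipRuns_head hz
            simp only [Option.map_some]
            conv_rhs => rw [hl]
            simp
      · by_cases hxc : x = c
        · -- A skips within its current run of c
          subst hxc
          have hyx : (y == x) = false := by simp; exact fun hh => hxy hh.symm
          rw [show maxSubStrLoop x x (x :: xs') (y :: ys') acc
                = maxSubStrLoop x x xs' (y :: ys') acc by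
            simp [maxSubStrLoop, hxy]]
          rw [ih xs' (y :: ys') (by simp at h ⊢; omega) x acc]
          obtain ⟨nA, ra, ha1, ha2⟩ := rle_shape x xs'
          rw [ha1, ha2, rle_cons_ne hyx, show nA + 1 + 1 = (nA + 1) + 1 from rfl,
            zip_one_right, zip_one_right]
        · by_cases hyc : y = c
          · -- B skips within its current run of c
            subst hyc
            have hxy2 : (x == y) = false := by simpa using hxy
            have hcx : ¬ (y = x) := fun hh => hxy hh.symm
            rw [show maxSubStrLoop y y (x :: xs') (y :: ys') acc
                  = maxSubStrLoop y y (x :: xs') ys' acc by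
              simp [maxSubStrLoop, hxy, hcx]]
            rw [ih (x :: xs') ys' (by simp at h ⊢; omega) y acc]
            obtain ⟨nB, rb, hb1, hb2⟩ := rle_shape y ys'
            rw [hb1, hb2, rle_cons_ne hxy2, show nB + 1 + 1 = (nB + 1) + 1 from rfl,
              zip_one_left, zip_one_left]
          · -- new runs start with different chars: both sides report Fegla Won
            have hxc' : (x == c) = false := by simpa using hxc
            have hyc' : (y == c) = false := by simpa using hyc
            have hcx : ¬ (c = x) := fun hh => hxc hh.symm
            have hcy : ¬ (c = y) := fun hh => hyc hh.symm
            rw [show maxSubStrLoop c c (x :: xs') (y :: ys') acc = "Fegla Won".toList by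
              simp [maxSubStrLoop, hxy, hcx, hcy]]
            rw [rle_cons_ne hxc', rle_cons_ne hyc']
            simp [rle, zipRuns, hxy]

theorem maxSubStr_spec : Claim_equal_maxSubStr := by
  intro A B _ hpre
  unfold Spec_maxSubStr maxSubStr maxSubStr_alt
  obtain ⟨hA, hB⟩ := hpre
  cases hAl : A.toList with
  | nil => exact absurd hAl hA
  | cons x xs =>
    cases hBl : B.toList with
    | nil => exact absurd hBl hB
    | cons y ys =>
      by_cases hxy : x = y
      · subst hxy
        simp only [ne_eq, not_true_eq_false, if_neg, not_not, if_pos rfl]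
        rw [loop_eq_zip (xs.length + ys.length) xs ys le_rfl x [x]]
        cases hz : zipRuns (rle (x :: xs)) (rle (x :: ys)) with
        | none => simp
        | some l =>
          simp only
          have := zipRuns_head hz
          conv_rhs => rw [this]
          simp
      · simp only [ne_eq, hxy, not_false_eq_true, if_pos]
        have hxy2 : (x == y) = false := by simpa using hxy
        simp [rle, zipRuns, hxy]
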